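-- pv_equiv track=rewrite | github.com/Pr0x1mo/SHIELD | SHIELD/reporting_gui.py | _compute_line_pos
-- ===== SOURCE A (Python) =====
-- def _compute_line_pos(text, start, end):
--     """Return (line_number, left, right) for char span [start:end) within text."""
--     lines = text.splitlines()
--     offset = 0
--     for i, line in enumerate(lines):
--         line_len = len(line) + 1  # +1 for '\n'
--         if offset + line_len > start:
--             left = start - offset
--             right = end - offset
--             return i, left, right
--         offset += line_len
--     return -1, -1, -1
-- ===== SOURCE B (Python) =====
-- def _compute_line_pos(text, start, end):
--     """Return (line_number, left, right) for char span [start:end) within text."""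
--     lines = text.splitlines()
--     # cumulative end offsets: ends[i] = sum of len(lines[j]) + 1 for j <= i
--     ends = []
--     total = 0
--     for line in lines:
--         total += len(line) + 1
--         ends.append(total)
--     # binary search (bisect_right): first index i with ends[i] > start
--     lo, hi = 0, len(ends)
--     while lo < hi:
--         mid = (lo + hi) // 2
--         if start < ends[mid]:
--             hi = mid
--         else:
--             lo = mid + 1
--     if lo < len(lines):
--         base = ends[lo - 1] if lo > 0 else 0
--         return lo, start - base, end - base
--     return -1, -1, -1
-- ===== Notes on version B (the rewrite author's own statement) =====
-- stated objective: alternative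
-- what changed: Replaces the fused linear scan with early return by a cumulative end-offset table plus a bisect_right-style binary search that locates the line.
import Mathlib
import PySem

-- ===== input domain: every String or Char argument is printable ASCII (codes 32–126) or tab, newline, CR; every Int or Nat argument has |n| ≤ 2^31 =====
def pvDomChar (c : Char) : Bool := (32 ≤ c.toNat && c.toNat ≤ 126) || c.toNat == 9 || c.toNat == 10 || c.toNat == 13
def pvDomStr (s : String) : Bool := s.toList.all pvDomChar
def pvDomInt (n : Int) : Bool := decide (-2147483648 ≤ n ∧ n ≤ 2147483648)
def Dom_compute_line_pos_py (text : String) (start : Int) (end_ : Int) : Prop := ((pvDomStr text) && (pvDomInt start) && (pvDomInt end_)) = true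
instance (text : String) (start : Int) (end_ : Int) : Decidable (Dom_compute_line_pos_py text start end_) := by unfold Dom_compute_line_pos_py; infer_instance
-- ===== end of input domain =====

-- B replaces A's fused linear scan (early return) by a cumulative end-offset table plus a
-- bisect_right-style binary search; same return value everywhere (objective: alternative).

-- ===== PORT A =====
-- A's for-loop over enumerate(lines) carrying the running offset and the index.
def pvAGo (start end_ : Int) : List String → Int → Int → Int × Int × Int
  | [], _, _ => (-1, -1, -1)
  | line :: rest, i, offset =>
    -- line_len = len(line) + 1  (inlined)
    if offset + (PySem.Str.len line + 1) > start then (i, start - offset, end_ - offset)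
    else pvAGo start end_ rest (i + 1) (offset + (PySem.Str.len line + 1))

def compute_line_pos_py (text : String) (start : Int) (end_ : Int) : Int × Int × Int :=
  pvAGo start end_ (PySem.Str.splitlines text) 0 0

-- ===== PORT B =====
-- Source B's first loop: build the cumulative end-offset table carrying `total`.
def pvBuildEnds : List String → Int → List Int
  | [], _ => []
  | line :: rest, total =>
    (total + (PySem.Str.len line + 1)) :: pvBuildEnds rest (total + (PySem.Str.len line + 1))

-- Source B's while-loop: bisect_right — first index lo with start < ends[lo].
def pvBisect (ends : List Int) (start : Int) (lo hi : Nat) : Nat :=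
  if _h : lo < hi then
    let mid := (lo + hi) / 2
    if start < ends.getD mid 0 then pvBisect ends start lo mid
    else pvBisect ends start (mid + 1) hi
  else lo
termination_by hi - lo

def compute_line_pos_py_alt (text : String) (start : Int) (end_ : Int) : Int × Int × Int :=
  let lines := PySem.Str.splitlines text
  let ends := pvBuildEnds lines 0
  let lo := pvBisect ends start 0 ends.length
  if lo < lines.length then
    let base := if 0 < lo then ends.getD (lo - 1) 0 else 0
    ((lo : Int), start - base, end_ - base)
  else (-1, -1, -1)

-- ===== PRECONDITION & SPEC =====
def Spec_compute_line_pos_py (text : String) (start : Int) (end_ : Int) (out : Int × Int × Int) : Prop := out = compute_line_pos_py_alt text start end_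
instance (text : String) (start : Int) (end_ : Int) (out : Int × Int × Int) : Decidable (Spec_compute_line_pos_py text start end_ out) := by unfold Spec_compute_line_pos_py; infer_instance

-- ===== CLAIM (what is proved, stated in full; the proofs are below) =====
def Claim_equal_compute_line_pos_py : Prop := ∀ (text : String) (start : Int) (end_ : Int), Dom_compute_line_pos_py text start end_ → Spec_compute_line_pos_py text start end_ (compute_line_pos_py text start end_)

-- ===== LEMMAS AND PROOFS =====

-- base offset of line r: end of line r-1, or `offset` for r = 0
def pvBase (ends : List Int) (offset : Int) (r : Nat) : Int :=
  if 0 < r then ends.getD (r - 1) 0 else offset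

theorem pvBuildEnds_length (ls : List String) (t : Int) :
    (pvBuildEnds ls t).length = ls.length := by
  induction ls generalizing t with
  | nil => rfl
  | cons l rest ih => simp [pvBuildEnds, ih]

-- every element of pvBuildEnds ls t is ≥ t + 1, and the list is sorted (≤)
theorem pvBuildEnds_lb_sorted (ls : List String) (t : Int) :
    (∀ e ∈ pvBuildEnds ls t, t + 1 ≤ e) ∧ (pvBuildEnds ls t).Pairwise (· ≤ ·) := by
  induction ls generalizing t with
  | nil => simp [pvBuildEnds]
  | cons l rest ih =>
    have hlen : (0 : Int) ≤ PySem.Str.len l := by simp [PySem.Str.len_eq]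
    obtain ⟨hlb, hsort⟩ := ih (t + (PySem.Str.len l + 1))
    refine ⟨?_, ?_⟩
    · intro e he
      simp only [pvBuildEnds, List.mem_cons] at he
      rcases he with h | h
      · omega
      · have := hlb e h; omega
    · simp only [pvBuildEnds, List.pairwise_cons]
      exact ⟨fun e he => by have := hlb e he; omega, hsort⟩

theorem pvBuildEnds_mono (ls : List String) (t : Int) {i j : Nat}
    (hij : i ≤ j) (hj : j < (pvBuildEnds ls t).length) :
    (pvBuildEnds ls t).getD i 0 ≤ (pvBuildEnds ls t).getD j 0 := by
  rcases eq_or_lt_of_le hij with rfl | hlt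
  · exact le_refl _
  · have hsort := (pvBuildEnds_lb_sorted ls t).2
    rw [List.pairwise_iff_getElem] at hsort
    have hi : i < (pvBuildEnds ls t).length := lt_trans hlt hj
    rw [List.getD_eq_getElem _ _ hi, List.getD_eq_getElem _ _ hj]
    exact hsort i j hi hj hlt

-- uniqueness characterisation of findIdx
theorem findIdx_unique (p : Int → Bool) :
    ∀ (l : List Int) (r : Nat), r ≤ l.length →
    (∀ j, j < r → ¬ p (l.getD j 0)) → (r < l.length → p (l.getD r 0)) →
    l.findIdx p = r := by
  intro l
  induction l with
  | nil =>
    intro r hr _ _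
    have : r = 0 := Nat.le_zero.mp hr
    subst this; rfl
  | cons e rest ih =>
    intro r hr hlt hat
    by_cases hpe : p e
    · have hr0 : r = 0 := by
        by_contra h
        exact hlt 0 (Nat.pos_of_ne_zero h) (by simpa using hpe)
      simp [hr0, List.findIdx_cons, hpe]
    · have hr0 : r ≠ 0 := by
        intro h
        subst h
        exact hpe (by simpa using hat (by simp))
      obtain ⟨r', rfl⟩ := Nat.exists_eq_succ_of_ne_zero hr0
      have := ih r' (by simpa using hr)
        (fun j hj => by simpa using hlt (j + 1) (by omega))
        (fun h => by simpa using hat (by simpa using h))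
      simp [List.findIdx_cons, hpe, this]

-- the binary search computes findIdx on a monotone list (fuel = hi - lo)
theorem pvBisect_eq_findIdx_aux (ends : List Int) (start : Int)
    (mono : ∀ {i j : Nat}, i ≤ j → j < ends.length → ends.getD i 0 ≤ ends.getD j 0) :
    ∀ (n lo hi : Nat), hi - lo ≤ n → lo ≤ hi → hi ≤ ends.length →
    (∀ j, j < lo → ¬ start < ends.getD j 0) →
    (∀ j, hi ≤ j → j < ends.length → start < ends.getD j 0) →
    pvBisect ends start lo hi = ends.findIdx (fun e => decide (start < e)) := by
  intro n
  induction n with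
  | zero =>
    intro lo hi hfuel hlohi hhi hbelow habove
    have heq : lo = hi := by omega
    rw [pvBisect, dif_neg (by omega)]
    symm
    apply findIdx_unique
    · omega
    · intro j hj; simpa using hbelow j hj
    · intro hlt; simpa using habove lo (by omega) hlt
  | succ n ih =>
    intro lo hi hfuel hlohi hhi hbelow habove
    rw [pvBisect]
    by_cases h : lo < hi
    · rw [dif_pos h]
      by_cases hc : start < ends.getD ((lo + hi) / 2) 0
      · rw [if_pos hc]
        exact ih lo ((lo + hi) / 2) (by omega) (by omega) (by omega) hbelow
          (fun j hj hjlen => lt_of_lt_of_le hc (mono hj hjlen))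
      · rw [if_neg hc]
        exact ih ((lo + hi) / 2 + 1) hi (by omega) (by omega) hhi
          (fun j hj hgt => hc (lt_of_lt_of_le hgt (mono (by omega) (by omega))))
          habove
    · rw [dif_neg h]
      symm
      apply findIdx_unique
      · omega
      · intro j hj; simpa using hbelow j hj
      · intro hlt; simpa using habove lo (by omega) hlt

theorem pvBase_cons (t : Int) (ends : List Int) (offset : Int) (r : Nat) :
    pvBase (t :: ends) offset (r + 1) = pvBase ends t r := by
  cases r with
  | zero => simp [pvBase]
  | succ k => simp [pvBase]

-- A's loop, expressed through the table and findIdx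
theorem pvAGo_eq (start end_ : Int) :
    ∀ (ls : List String) (i offset : Int),
    pvAGo start end_ ls i offset =
      (if (pvBuildEnds ls offset).findIdx (fun e => decide (start < e)) < ls.length then
        (i + ((pvBuildEnds ls offset).findIdx (fun e => decide (start < e)) : Int),
         start - pvBase (pvBuildEnds ls offset) offset ((pvBuildEnds ls offset).findIdx (fun e => decide (start < e))),
         end_ - pvBase (pvBuildEnds ls offset) offset ((pvBuildEnds ls offset).findIdx (fun e => decide (start < e))))
       else (-1, -1, -1)) := by
  intro ls
  induction ls with
  | nil => intro i offset; simp [pvAGo, pvBuildEnds]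
  | cons line rest ih =>
    intro i offset
    simp only [pvAGo, pvBuildEnds, List.findIdx_cons]
    by_cases hc : start < offset + (PySem.Str.len line + 1)
    · rw [if_pos (by omega), decide_eq_true hc]
      simp only [cond_true]
      rw [if_pos (by simp)]
      simp [pvBase]
    · rw [if_neg (by omega), decide_eq_false hc]
      simp only [cond_false]
      rw [ih (i + 1) (offset + (PySem.Str.len line + 1))]
      set t := offset + (PySem.Str.len line + 1) with ht
      set r' := (pvBuildEnds rest t).findIdx (fun e => decide (start < e)) with hr'
      by_cases hlt : r' < rest.length
      · rw [if_pos hlt, if_pos (by simp only [List.length_cons]; omega),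
          pvBase_cons]
        simp only [Prod.mk.injEq, and_true]
        push_cast; ring
      · rw [if_neg hlt, if_neg (by simp only [List.length_cons]; omega)]

-- ===== VERDICT (by name: the statement is the Claim_ definition above) =====
theorem compute_line_pos_py_spec : Claim_equal_compute_line_pos_py := by
  intro text start end_ _
  unfold Spec_compute_line_pos_py compute_line_pos_py compute_line_pos_py_alt
  set ls := PySem.Str.splitlines text with hls
  set ends := pvBuildEnds ls 0 with hends
  have hlen : ends.length = ls.length := pvBuildEnds_length ls 0
  have hbis : pvBisect ends start 0 ends.length
      = ends.findIdx (fun e => decide (start < e)) :=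
    pvBisect_eq_findIdx_aux ends start (fun hij hj => pvBuildEnds_mono ls 0 hij hj)
      ends.length 0 ends.length (by omega) (by omega) (le_refl _) (by omega) (by omega)
  rw [pvAGo_eq]
  simp only [hbis, ← hends]
  set r := ends.findIdx (fun e => decide (start < e)) with hr
  by_cases h : r < ls.length
  · rw [if_pos h, if_pos h]
    simp [pvBase]
  · rw [if_neg h, if_neg h]
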